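-- pv_equiv track=rewrite | github.com/sssn-tech/Algorithm-Problem-Set | src/leetcode/2266.统计打字方案数.py | strSplit
-- ===== SOURCE A (Python) =====
-- from typing import List
--
-- def strSplit(s: str) -> List[str]:
--     # 将字符串s切成相同字符的列表
--     n = len(s)
--     if n == 0 or n == 1:
--         return [s]
--     res = []
--     lo, hi = 0, 1
--     while lo <= hi and hi <= n:
--         while hi < n and s[hi] == s[hi - 1]:
--             hi += 1
--         res.append(s[lo:hi])
--         lo = hi
--         hi += 1
--     return res
-- ===== SOURCE B (Python) =====
-- from typing import List
--
-- def strSplit(s: str) -> List[str]: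
--     # two-pass: compute run-boundary cut indices first, then slice
--     n = len(s)
--     cuts = [0] + [i for i in range(1, n) if s[i] != s[i - 1]] + [n]
--     return [s[cuts[j]:cuts[j + 1]] for j in range(len(cuts) - 1)]
-- ===== Notes on version B (the rewrite author's own statement) =====
-- stated objective: alternative
-- what changed: Replaces A's lo/hi two-pointer walk with nested while loops by a two-pass shape: first build the list of run-boundary cut indices, then slice the string between consecutive cuts.
import Mathlib
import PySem

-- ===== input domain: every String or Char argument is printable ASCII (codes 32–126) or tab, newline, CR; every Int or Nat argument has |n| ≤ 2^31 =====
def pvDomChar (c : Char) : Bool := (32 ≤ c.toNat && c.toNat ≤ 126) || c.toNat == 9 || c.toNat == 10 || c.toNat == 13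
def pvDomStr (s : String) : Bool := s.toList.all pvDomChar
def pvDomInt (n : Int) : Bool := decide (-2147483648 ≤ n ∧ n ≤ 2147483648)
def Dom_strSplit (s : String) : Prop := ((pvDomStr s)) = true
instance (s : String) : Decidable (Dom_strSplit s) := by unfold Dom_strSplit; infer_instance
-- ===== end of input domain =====

-- B replaces A's lo/hi pointer walk by a two-pass shape (cut-index table, then slices); A = B on every string.

-- ===== PORT A =====
-- inner while loop: 'while hi < n and s[hi] == s[hi-1]: hi += 1' (both indices are in range there, so getD is exact)
def innerA (cs : List Char) (n hi : Nat) : Nat :=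
  if hi < n ∧ cs.getD hi ' ' = cs.getD (hi - 1) ' ' then innerA cs n (hi + 1) else hi
termination_by n - hi
decreasing_by omega

-- innerA only moves hi forward (needed by outerA's termination)
theorem le_innerA (cs : List Char) (n hi : Nat) : hi ≤ innerA cs n hi := by
  unfold innerA
  split
  · exact le_trans (Nat.le_succ hi) (le_innerA cs n (hi + 1))
  · exact le_refl hi
termination_by n - hi
decreasing_by omega

-- outer loop: 'while lo <= hi and hi <= n: <inner loop>; res.append(s[lo:hi]); lo = hi; hi += 1'
-- ('innerA cs n hi' is hi after the inner loop; s[lo:hi] with 0 ≤ lo ≤ hi is (drop lo).take (hi-lo), cf. PySem.List.slice_natCast)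
def outerA (cs : List Char) (n lo hi : Nat) (res : List String) : List String :=
  if lo ≤ hi ∧ hi ≤ n then
    outerA cs n (innerA cs n hi) (innerA cs n hi + 1)
      (res ++ [String.ofList ((cs.drop lo).take (innerA cs n hi - lo))])
  else res
termination_by n + 1 - hi
decreasing_by have := le_innerA cs n hi; omega

def strSplit (s : String) : List String :=
  let cs := s.toList
  let n := cs.length
  if n = 0 ∨ n = 1 then [s]
  else outerA cs n 0 1 []

-- ===== PORT B =====
-- cuts = [0] + [i for i in range(1, n) if s[i] != s[i-1]] + [n]
-- return [s[cuts[j]:cuts[j+1]] for j in range(len(cuts) - 1)]  (all cut indices are in range, so getD is exact)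
def strSplit_alt (s : String) : List String :=
  let cs := s.toList
  let n := cs.length
  let cuts : List Nat :=
    [0] ++ (List.range' 1 (n - 1)).filter (fun i => cs.getD i ' ' != cs.getD (i - 1) ' ') ++ [n]
  (List.range (cuts.length - 1)).map
    (fun j => String.ofList ((cs.drop (cuts.getD j 0)).take (cuts.getD (j + 1) 0 - cuts.getD j 0)))

-- ===== PRECONDITION & SPEC =====
def Spec_strSplit (s : String) (out : List String) : Prop := out = strSplit_alt s
instance (s : String) (out : List String) : Decidable (Spec_strSplit s out) := by unfold Spec_strSplit; infer_instance

-- ===== CLAIM (what is proved, stated in full; the proofs are below) =====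
def Claim_equal_strSplit : Prop := ∀ (s : String), Dom_strSplit s → Spec_strSplit s (strSplit s)

-- ===== LEMMAS AND PROOFS =====

-- canonical maximal-run decomposition, the common reference point of both proofs
def runs : List Char → List (List Char)
  | [] => []
  | c :: t =>
    (c :: t.takeWhile (fun x => x = c)) :: runs (t.dropWhile (fun x => x = c))
termination_by cs => cs.length
decreasing_by simpa using Nat.lt_succ_of_le (List.length_dropWhile_le _ _)

theorem runs_flatten (cs : List Char) : (runs cs).flatten = cs := by
  induction cs using runs.induct with
  | case1 => simp [runs]
  | case2 c t ih =>
    rw [runs]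
    simp only [List.flatten_cons, ih]
    simp [List.takeWhile_append_dropWhile]

-- the cut positions after the first one, for a run list starting at offset a
def tailPos (a : Nat) : List (List Char) → List Nat
  | [] => [a]
  | r :: rs => a :: tailPos (a + r.length) rs

-- slices of cs between consecutive entries of a cut list
def chunks (cs : List Char) : List Nat → List (List Char)
  | [] => []
  | [_] => []
  | a :: b :: r => ((cs.drop a).take (b - a)) :: chunks cs (b :: r)

theorem getD_mid (pre rest : List Char) (i : Nat) (d : Char) :
    (pre ++ rest).getD (pre.length + i) d = rest.getD i d := by
  rw [List.getD_append_right pre rest d _ (by omega)]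
  simp

theorem head_dw {t t' : List Char} {c c' : Char}
    (hdw : t.dropWhile (fun x => x = c) = c' :: t') : c' ≠ c := by
  have h := List.head_dropWhile_not (fun x => decide (x = c)) (l := t) (by simp [hdw])
  simp only [hdw, List.head_cons] at h
  simpa using h

-- every position inside the run c :: t (all of t equal to c) holds c
theorem getD_run (pre t rest2 : List Char) (c : Char) (hall : ∀ x ∈ t, x = c)
    (j : Nat) (hj : j ≤ t.length) :
    ((pre ++ c :: t) ++ rest2).getD (pre.length + j) ' ' = c := by
  rw [List.getD_append _ rest2 _ _ (by simp; omega), getD_mid]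
  cases j with
  | zero => simp
  | succ j' =>
    simp only [List.getD_cons_succ]
    have hj' : j' < t.length := by omega
    rw [List.getD_eq_getElem _ _ hj']
    exact hall _ (List.getElem_mem hj')

theorem innerA_spec (t : List Char) : ∀ (pre : List Char) (c : Char),
    innerA (pre ++ c :: t) (pre.length + 1 + t.length) (pre.length + 1)
      = pre.length + 1 + (t.takeWhile (fun x => x = c)).length := by
  induction t with
  | nil => intro pre c; rw [innerA]; simp
  | cons r rs ih =>
    intro pre c
    rw [innerA]
    have h1 : (pre ++ c :: r :: rs).getD (pre.length + 1) ' ' = r := by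
      simp
    have h2 : (pre ++ c :: r :: rs).getD (pre.length + 1 - 1) ' ' = c := by
      simp
    rw [h1, h2]
    by_cases hrc : r = c
    · subst hrc
      have hcond : (pre.length + 1 < pre.length + 1 + (r :: rs).length ∧ r = r) := by
        simp
      rw [if_pos hcond]
      have hre : pre ++ r :: r :: rs = (pre ++ [r]) ++ r :: rs := by simp
      have hlen : pre.length + 1 + (r :: rs).length = (pre ++ [r]).length + 1 + rs.length := by
        simp; omega
      have hhi : pre.length + 1 + 1 = (pre ++ [r]).length + 1 := by simp
      rw [hre, hlen, hhi, ih (pre ++ [r]) r]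
      simp
      omega
    · rw [if_neg (by simp [hrc])]
      simp [hrc]

theorem outerA_spec (rest : List Char) : ∀ (pre : List Char) (res : List String),
    outerA (pre ++ rest) (pre.length + rest.length) pre.length (pre.length + 1) res
      = res ++ (runs rest).map String.ofList := by
  induction rest using runs.induct with
  | case1 =>
    intro pre res
    rw [outerA]
    simp [runs]
  | case2 c t ih =>
    intro pre res
    rw [outerA]
    rw [if_pos (by simp)]
    have hlen : pre.length + (c :: t).length = pre.length + 1 + t.length := by simp; omega
    rw [hlen, innerA_spec t pre c]
    set tw := t.takeWhile (fun x => x = c) with htw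
    set dw := t.dropWhile (fun x => x = c) with hdw
    set k := tw.length with hk
    have hkle : k ≤ t.length := by
      rw [hk, htw]; exact (List.takeWhile_prefix _).length_le
    have hslice : (((pre ++ c :: t).drop pre.length).take (pre.length + 1 + k - pre.length))
        = c :: tw := by
      rw [List.drop_append_of_le_length (by omega)]
      simp only [List.drop_length, List.nil_append]
      have h2 : pre.length + 1 + k - pre.length = k + 1 := by omega
      rw [h2, List.take_succ_cons]
      rw [hk, htw]
      exact congrArg _ (List.prefix_iff_eq_take.mp (List.takeWhile_prefix _)).symm
    rw [hslice]
    have hsplit : pre ++ c :: t = (pre ++ (c :: tw)) ++ dw := by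
      simp [htw, hdw, List.takeWhile_append_dropWhile]
    have hlt : tw.length + dw.length = t.length := by
      rw [htw, hdw, ← List.length_append, List.takeWhile_append_dropWhile]
    have hlen2 : pre.length + 1 + t.length = (pre ++ (c :: tw)).length + dw.length := by
      simp only [List.length_append, List.length_cons]
      omega
    have hlo : pre.length + 1 + k = (pre ++ (c :: tw)).length := by simp [hk]; omega
    rw [hsplit, hlen2, hlo, ih (pre ++ (c :: tw)) _]
    rw [runs]
    simp [← htw, ← hdw]

theorem cuts_spec (t : List Char) (c : Char) (pre : List Char) :
    (List.range' (pre.length + 1) t.length).filter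
        (fun i => (pre ++ c :: t).getD i ' ' != (pre ++ c :: t).getD (i - 1) ' ')
      ++ [pre.length + 1 + t.length]
      = tailPos (pre.length + 1 + (t.takeWhile (fun x => x = c)).length)
          (runs (t.dropWhile (fun x => x = c))) := by
  have halltw : ∀ x ∈ t.takeWhile (fun x => x = c), x = c := by
    intro x hx; have := List.mem_takeWhile_imp hx; simpa using this
  set tw := t.takeWhile (fun x => x = c) with htw
  set k := tw.length with hk
  have hkle : k ≤ t.length := by rw [hk, htw]; exact (List.takeWhile_prefix _).length_le
  have hcs : pre ++ c :: t = (pre ++ c :: tw) ++ t.dropWhile (fun x => x = c) := by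
    simp [htw]
  have hrunfalse : ∀ i ∈ List.range' (pre.length + 1) k,
      ((pre ++ c :: t).getD i ' ' != (pre ++ c :: t).getD (i - 1) ' ') = false := by
    intro i hi
    rw [List.mem_range'_1] at hi
    have hgi : (pre ++ c :: t).getD i ' ' = c := by
      have h := getD_run pre tw (t.dropWhile (fun x => x = c)) c halltw (i - pre.length)
        (by omega)
      rw [← hcs] at h
      have : pre.length + (i - pre.length) = i := by omega
      rwa [this] at h
    have hgi1 : (pre ++ c :: t).getD (i - 1) ' ' = c := by
      have h := getD_run pre tw (t.dropWhile (fun x => x = c)) c halltw (i - 1 - pre.length)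
        (by omega)
      rw [← hcs] at h
      have : pre.length + (i - 1 - pre.length) = i - 1 := by omega
      rwa [this] at h
    simp only [hgi, hgi1, bne_self_eq_false]
  cases hdw : t.dropWhile (fun x => x = c) with
  | nil =>
    have htdecomp : tw ++ ([] : List Char) = t := by
      rw [← hdw, htw]; exact List.takeWhile_append_dropWhile
    have hteq : t.length = k := by rw [← htdecomp]; simp [hk]
    rw [hteq, List.filter_eq_nil_iff.mpr (fun i hi => by simp only [hrunfalse i hi]; exact Bool.false_ne_true)]
    simp [runs, tailPos]
  | cons c' t' =>
    have htdecomp : tw ++ (c' :: t') = t := by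
      rw [← hdw, htw]; exact List.takeWhile_append_dropWhile
    have hteq : t.length = k + (t'.length + 1) := by rw [← htdecomp]; simp [hk]
    have hlt' : t'.length < t.length := by omega
    have hcs2 : pre ++ c :: t = (pre ++ c :: tw) ++ c' :: t' := by rw [hcs, hdw]
    have hlen' : (pre ++ c :: tw).length = pre.length + 1 + k := by simp [hk]; omega
    -- split the index range at the end of the first run
    rw [hteq, ← List.range'_append_1, List.filter_append]
    rw [List.filter_eq_nil_iff.mpr (fun i hi => by simp only [hrunfalse i hi]; exact Bool.false_ne_true)]
    rw [List.range'_succ, List.filter_cons]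
    have hpred : ((pre ++ c :: t).getD (pre.length + 1 + k) ' '
        != (pre ++ c :: t).getD (pre.length + 1 + k - 1) ' ') = true := by
      have hga : (pre ++ c :: t).getD (pre.length + 1 + k) ' ' = c' := by
        rw [hcs2]
        have h := getD_mid (pre ++ c :: tw) (c' :: t') 0 ' '
        rw [hlen'] at h
        simpa using h
      have hga1 : (pre ++ c :: t).getD (pre.length + 1 + k - 1) ' ' = c := by
        have h := getD_run pre tw (c' :: t') c halltw k (le_refl k)
        rw [← hcs2] at h
        have : pre.length + 1 + k - 1 = pre.length + k := by omega
        rw [this]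
        exact h
      rw [hga, hga1]
      simpa using head_dw hdw
    rw [hpred]
    simp only [List.nil_append]
    -- recursive step on the rest of the string
    have hrec := cuts_spec t' c' (pre ++ c :: tw)
    rw [← hcs2, hlen'] at hrec
    rw [runs, tailPos]
    rw [if_pos trivial]
    simp only [List.cons_append, List.length_cons]
    congr 1
    rw [show pre.length + 1 + (k + (t'.length + 1)) = pre.length + 1 + k + 1 + t'.length from by
          omega,
        show pre.length + 1 + k + ((List.takeWhile (fun x => decide (x = c')) t').length + 1)
            = pre.length + 1 + k + 1 + (List.takeWhile (fun x => decide (x = c')) t').length from by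
          omega]
    exact hrec
termination_by t.length
decreasing_by exact hlt'

theorem chunks_tailPos (rs : List (List Char)) : ∀ (cs : List Char) (a : Nat),
    cs.drop a = rs.flatten → chunks cs (tailPos a rs) = rs := by
  induction rs with
  | nil => intro cs a h; simp [tailPos, chunks]
  | cons r rs ih =>
    intro cs a h
    have hhead : ∀ b rs', tailPos b rs' = b :: (tailPos b rs').tail := by
      intro b rs'; cases rs' <;> simp [tailPos]
    rw [tailPos]
    cases rs with
    | nil =>
      simp [tailPos, chunks]
      simp at h
      rw [h]; simp
    | cons r2 rs2 =>
      rw [tailPos, chunks]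
      congr 1
      · rw [h]; simp
      · show chunks cs (tailPos (a + r.length) (r2 :: rs2)) = _
        apply ih
        rw [← List.drop_drop, h]
        simp

theorem map_range_chunks (cs : List Char) : ∀ (cuts : List Nat),
    (List.range (cuts.length - 1)).map
        (fun j => (cs.drop (cuts.getD j 0)).take (cuts.getD (j + 1) 0 - cuts.getD j 0))
      = chunks cs cuts := by
  intro cuts
  induction cuts with
  | nil => simp [chunks]
  | cons a r ih =>
    cases r with
    | nil => simp [chunks]
    | cons b r2 =>
      rw [chunks]
      simp only [List.length_cons, Nat.add_sub_cancel, List.range_succ_eq_map, List.map_cons,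
        List.map_map]
      congr 1

theorem a_runs (s : String) (h : s.toList ≠ []) :
    strSplit s = (runs s.toList).map String.ofList := by
  simp only [strSplit]
  obtain ⟨c, t, hct⟩ := List.exists_cons_of_ne_nil h
  by_cases h1 : s.toList.length = 1
  · rw [if_pos (Or.inr h1)]
    rw [hct] at h1 ⊢
    simp at h1
    subst h1
    rw [runs]
    simp [← hct, String.ofList_toList, runs]
  · rw [if_neg (by rw [hct]; simp; rw [hct] at h1; simpa using h1)]
    have := outerA_spec s.toList [] []
    simpa using this

theorem alt_runs (s : String) (h : s.toList ≠ []) :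
    strSplit_alt s = (runs s.toList).map String.ofList := by
  obtain ⟨c, t, hct⟩ := List.exists_cons_of_ne_nil h
  have hcuts := cuts_spec t c []
  simp only [List.length_nil, List.nil_append, Nat.zero_add] at hcuts
  simp only [strSplit_alt, hct, List.length_cons, Nat.add_sub_cancel]
  rw [show 1 + t.length = t.length + 1 from Nat.add_comm 1 t.length] at hcuts
  rw [List.append_assoc, hcuts]
  have hc2 : (0 :: tailPos (1 + (t.takeWhile (fun x => x = c)).length)
      (runs (t.dropWhile (fun x => x = c)))) = tailPos 0 (runs (c :: t)) := by
    rw [runs, tailPos]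
    congr 1
    congr 1
    simp
    omega
  rw [show ([0] : List Nat) ++ tailPos (1 + (t.takeWhile (fun x => x = c)).length)
        (runs (t.dropWhile (fun x => x = c)))
      = tailPos 0 (runs (c :: t)) from hc2]
  rw [show (fun j => String.ofList ((List.drop ((tailPos 0 (runs (c :: t))).getD j 0) (c :: t)).take
        ((tailPos 0 (runs (c :: t))).getD (j + 1) 0 - (tailPos 0 (runs (c :: t))).getD j 0)))
      = String.ofList ∘ (fun j => ((List.drop ((tailPos 0 (runs (c :: t))).getD j 0) (c :: t)).take
        ((tailPos 0 (runs (c :: t))).getD (j + 1) 0 - (tailPos 0 (runs (c :: t))).getD j 0)))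
      from rfl]
  rw [← List.map_map, map_range_chunks, chunks_tailPos (runs (c :: t)) (c :: t) 0
    (by simpa using (runs_flatten (c :: t)).symm)]

-- ===== VERDICT (by name: the statement is the Claim_ definition above) =====
theorem strSplit_spec : Claim_equal_strSplit := by
  intro s _
  unfold Spec_strSplit
  by_cases h : s.toList = []
  · simp only [strSplit, strSplit_alt, h]
    simp [String.toList_eq_nil_iff.mp h]
  · rw [a_runs s h, alt_runs s h]
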